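-- pv_equiv track=rewrite | github.com/KaYunKIM/ssafy | kayunkim/lectures/EXAM/월말평가/Jan/시험문제/서울_5반_김종관/07.py | q7
-- ===== SOURCE A (Python) =====
-- def q7(n):
--
--
--     number = [0, 1, 2, 3, 4, 5]
--     count = 0
--     for i in range(100, 1000):
--         if int(str(i)[0]) + int(str(i)[2]) == n and int(str(i)[0]) != int(str(i)[2]) :
--             if int(str(i)[0]) in number :
--                 if int(str(i)[2]) in number :
--                     if int(str(i)[1]) in number and int(str(i)[1]) != int(str(i)[0]) and int(str(i)[1]) != int(str(i)[2]):
--                         count += 1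
--
--     return count
-- ===== SOURCE B (Python) =====
-- def q7(n):
--     # Enumerate digit triples directly instead of scanning 100..999 via str().
--     count = 0
--     for d0 in range(1, 6):
--         for d1 in range(0, 6):
--             for d2 in range(0, 6):
--                 if d0 + d2 == n and d0 != d2 and d1 != d0 and d1 != d2:
--                     count += 1
--     return count
-- ===== Notes on version B (the rewrite author's own statement) =====
-- stated objective: faster
-- what changed: B enumerates the digit triples (d0 in 1..5, d1,d2 in 0..5) with the constraints directly, instead of scanning all integers 100..999 and parsing str(i) three times per check.
import Mathlib
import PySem

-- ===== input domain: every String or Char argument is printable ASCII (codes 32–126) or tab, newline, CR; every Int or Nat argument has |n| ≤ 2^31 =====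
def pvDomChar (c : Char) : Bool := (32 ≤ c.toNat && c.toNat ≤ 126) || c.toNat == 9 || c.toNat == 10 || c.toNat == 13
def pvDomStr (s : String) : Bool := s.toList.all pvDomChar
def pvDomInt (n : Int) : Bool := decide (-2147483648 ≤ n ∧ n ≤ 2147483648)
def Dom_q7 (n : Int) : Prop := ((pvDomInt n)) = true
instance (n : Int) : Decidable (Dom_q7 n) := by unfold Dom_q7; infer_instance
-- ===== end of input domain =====

set_option maxRecDepth 100000

-- B enumerates digit triples (d0 in 1..5, d1,d2 in 0..5) directly instead of scanning 100..999 and parsing str(i).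

-- ===== PORT A =====
-- int(str(i)[j]) via toChars/pyGet?/ofChars? (exact: str(i)[j] is one char, int of it);
-- the `none` branch is unreachable for 100 ≤ i < 1000 and j in 0..2 (Python never raises there)
def q7_digit (i : Int) (j : Int) : Int :=
  match (PySem.List.pyGet? (PySem.Int.toChars i) j).bind (fun c => PySem.Int.ofChars? [c]) with
  | some d => d
  | none => 0

def q7 (n : Int) : Int :=
  let number : List Int := [0, 1, 2, 3, 4, 5]
  (PySem.List.pyRange 100 1000 1).foldl (fun count i =>
    if q7_digit i 0 + q7_digit i 2 = n ∧ q7_digit i 0 ≠ q7_digit i 2 then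
      if q7_digit i 0 ∈ number then
        if q7_digit i 2 ∈ number then
          if q7_digit i 1 ∈ number ∧ q7_digit i 1 ≠ q7_digit i 0 ∧ q7_digit i 1 ≠ q7_digit i 2 then
            count + 1
          else count
        else count
      else count
    else count) 0

-- ===== PORT B =====
def q7_alt (n : Int) : Int :=
  (PySem.List.pyRange 1 6 1).foldl (fun count d0 =>
    (PySem.List.pyRange 0 6 1).foldl (fun count d1 =>
      (PySem.List.pyRange 0 6 1).foldl (fun count d2 =>
        if d0 + d2 = n ∧ d0 ≠ d2 ∧ d1 ≠ d0 ∧ d1 ≠ d2 then count + 1 else count)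
        count) count) 0

-- ===== PRECONDITION & SPEC =====
def Spec_q7 (n : Int) (out : Int) : Prop := out = q7_alt n
instance (n : Int) (out : Int) : Decidable (Spec_q7 n out) := by unfold Spec_q7; infer_instance

-- ===== CLAIM (what is proved, stated in full; the proofs are below) =====
def Claim_equal_q7 : Prop := ∀ (n : Int), Dom_q7 n → Spec_q7 n (q7 n)

-- ===== LEMMAS AND PROOFS =====

-- n-independent part of A's condition, and the value (d0+d2) compared with n
def fA (i : Int) : Option Int :=
  if q7_digit i 0 ≠ q7_digit i 2 ∧ q7_digit i 0 ∈ ([0,1,2,3,4,5] : List Int) ∧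
     q7_digit i 2 ∈ ([0,1,2,3,4,5] : List Int) ∧ q7_digit i 1 ∈ ([0,1,2,3,4,5] : List Int) ∧
     q7_digit i 1 ≠ q7_digit i 0 ∧ q7_digit i 1 ≠ q7_digit i 2 then
    some (q7_digit i 0 + q7_digit i 2)
  else none

def fB (d0 d1 d2 : Int) : Option Int :=
  if d0 ≠ d2 ∧ d1 ≠ d0 ∧ d1 ≠ d2 then some (d0 + d2) else none

-- the multiset (as an ordered list) of sums d0+d2 of the triples each loop counts
def LA : List Int := (PySem.List.pyRange 100 1000 1).filterMap fA
def LB : List Int :=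
  (PySem.List.pyRange 1 6 1).flatMap (fun d0 =>
    (PySem.List.pyRange 0 6 1).flatMap (fun d1 =>
      (PySem.List.pyRange 0 6 1).filterMap (fB d0 d1)))

lemma foldl_count (f : Int → Option Int) (n : Int) :
    ∀ (l : List Int) (a : Int),
      l.foldl (fun c i => if f i = some n then c + 1 else c) a
        = a + ((l.filterMap f).count n : Int) := by
  intro l
  induction l with
  | nil => intro a; simp
  | cons x xs ih =>
    intro a
    simp only [List.foldl_cons, List.filterMap_cons]
    cases hx : f x with
    | none => simp [ih]
    | some v =>
      by_cases hv : v = n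
      · subst hv
        simp only [if_pos rfl, ih, List.count_cons, beq_self_eq_true, if_true]
        omega
      · have hne : ¬ ((some v : Option Int) = some n) := by simp [hv]
        simp only [if_neg hne, ih, List.count_cons]
        simp [hv]

lemma bodyA_eq (n : Int) :
    (fun (count i : Int) =>
      if q7_digit i 0 + q7_digit i 2 = n ∧ q7_digit i 0 ≠ q7_digit i 2 then
        if q7_digit i 0 ∈ ([0,1,2,3,4,5] : List Int) then
          if q7_digit i 2 ∈ ([0,1,2,3,4,5] : List Int) then
            if q7_digit i 1 ∈ ([0,1,2,3,4,5] : List Int) ∧ q7_digit i 1 ≠ q7_digit i 0 ∧ q7_digit i 1 ≠ q7_digit i 2 then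
              count + 1
            else count
          else count
        else count
      else count)
    = (fun (c i : Int) => if fA i = some n then c + 1 else c) := by
  funext c i
  simp only [fA]
  by_cases h1 : q7_digit i 0 + q7_digit i 2 = n <;>
  by_cases h2 : q7_digit i 0 ≠ q7_digit i 2 <;>
  by_cases h3 : q7_digit i 0 ∈ ([0,1,2,3,4,5] : List Int) <;>
  by_cases h4 : q7_digit i 2 ∈ ([0,1,2,3,4,5] : List Int) <;>
  by_cases h5 : q7_digit i 1 ∈ ([0,1,2,3,4,5] : List Int) <;>
  by_cases h6 : q7_digit i 1 ≠ q7_digit i 0 <;>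
  by_cases h7 : q7_digit i 1 ≠ q7_digit i 2 <;>
  simp [h1, h2, h3, h4, h5, h6, h7]

lemma qA_count (n : Int) : q7 n = (LA.count n : Int) := by
  unfold q7
  simp only []
  rw [bodyA_eq n, foldl_count fA n]
  simp [LA]

lemma bodyB_eq (n d0 d1 : Int) :
    (fun (count d2 : Int) => if d0 + d2 = n ∧ d0 ≠ d2 ∧ d1 ≠ d0 ∧ d1 ≠ d2 then count + 1 else count)
    = (fun (c d2 : Int) => if fB d0 d1 d2 = some n then c + 1 else c) := by
  funext c d2
  simp only [fB]
  by_cases h1 : d0 + d2 = n <;>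
  by_cases h2 : d0 ≠ d2 ∧ d1 ≠ d0 ∧ d1 ≠ d2 <;>
  simp [h1, h2]

lemma foldl_add_count (n : Int) (h : Int → List Int) :
    ∀ (l : List Int) (a : Int),
      l.foldl (fun c x => c + ((h x).count n : Int)) a = a + ((l.flatMap h).count n : Int) := by
  intro l
  induction l with
  | nil => intro a; simp
  | cons x xs ih =>
    intro a
    simp only [List.foldl_cons, List.flatMap_cons, List.count_append, ih]
    push_cast
    ring

lemma qB_count (n : Int) : q7_alt n = (LB.count n : Int) := by
  unfold q7_alt
  have e1 : (fun (count d0 : Int) =>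
      (PySem.List.pyRange 0 6 1).foldl (fun count d1 =>
        (PySem.List.pyRange 0 6 1).foldl (fun count d2 =>
          if d0 + d2 = n ∧ d0 ≠ d2 ∧ d1 ≠ d0 ∧ d1 ≠ d2 then count + 1 else count) count) count)
      = (fun (c d0 : Int) =>
          c + (((PySem.List.pyRange 0 6 1).flatMap (fun d1 =>
            (PySem.List.pyRange 0 6 1).filterMap (fB d0 d1))).count n : Int)) := by
    funext c d0
    have e2 : (fun (count d1 : Int) =>
        (PySem.List.pyRange 0 6 1).foldl (fun count d2 =>
          if d0 + d2 = n ∧ d0 ≠ d2 ∧ d1 ≠ d0 ∧ d1 ≠ d2 then count + 1 else count) count)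
        = (fun (c' d1 : Int) =>
            c' + (((PySem.List.pyRange 0 6 1).filterMap (fB d0 d1)).count n : Int)) := by
      funext c' d1
      rw [bodyB_eq n d0 d1, foldl_count (fB d0 d1) n]
    rw [e2, foldl_add_count]
  rw [e1, foldl_add_count]
  simp [LB]

lemma LA_eq_LB : LA = LB := by decide

-- ===== VERDICT (by name: the statement is the Claim_ definition above) =====
theorem q7_spec : Claim_equal_q7 := by
  intro n _
  show q7 n = q7_alt n
  rw [qA_count, qB_count, LA_eq_LB]
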